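-- pv_equiv track=rewrite | github.com/positivef/dev-rules-starter-kit | scripts/prompt_feedback_analyzer.py | _format_issues
-- ===== SOURCE A (Python) =====
-- from typing import Dict, List, Optional
--
-- def _format_issues(issues: List[Dict]) -> List[str]:
--     """Format issues section"""
--     result = ["### [IMPROVEMENTS NEEDED]"]
--     critical = [i for i in issues if i.get("severity") == "critical"]
--     major = [i for i in issues if i.get("severity") == "major"]
--
--     if critical:
--         result.append("**Critical Issues:**")
--         result.extend(f"- {issue['description']}" for issue in critical[:3])
--
--     if major:
--         result.append("**Major Issues:**")
--         result.extend(f"- {issue['description']}" for issue in major[:3])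
--
--     result.append("")
--     return result
-- ===== SOURCE B (Python) =====
-- def _format_issues(issues):
--     """Format issues section: single capped pass that formats at most 3 lines per
--     severity as it goes, with an early break once both caps are full."""
--     crit, maj = [], []
--     for issue in issues:
--         if len(crit) == 3 and len(maj) == 3:
--             break
--         sev = issue.get("severity")
--         if sev == "critical":
--             if len(crit) < 3:
--                 crit.append(f"- {issue['description']}")
--         elif sev == "major":
--             if len(maj) < 3:
--                 maj.append(f"- {issue['description']}")
--     out = ["### [IMPROVEMENTS NEEDED]"]
--     if crit:
--         out.append("**Critical Issues:**")
--         out += crit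
--     if maj:
--         out.append("**Major Issues:**")
--         out += maj
--     out.append("")
--     return out
-- ===== Notes on version B (the rewrite author's own statement) =====
-- stated objective: alternative
-- what changed: B replaces A's two full filter-then-slice-then-format passes by one capped single pass that formats at most 3 lines per severity on the fly and breaks early once both caps are full; no intermediate filtered lists are built.
import Mathlib
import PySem

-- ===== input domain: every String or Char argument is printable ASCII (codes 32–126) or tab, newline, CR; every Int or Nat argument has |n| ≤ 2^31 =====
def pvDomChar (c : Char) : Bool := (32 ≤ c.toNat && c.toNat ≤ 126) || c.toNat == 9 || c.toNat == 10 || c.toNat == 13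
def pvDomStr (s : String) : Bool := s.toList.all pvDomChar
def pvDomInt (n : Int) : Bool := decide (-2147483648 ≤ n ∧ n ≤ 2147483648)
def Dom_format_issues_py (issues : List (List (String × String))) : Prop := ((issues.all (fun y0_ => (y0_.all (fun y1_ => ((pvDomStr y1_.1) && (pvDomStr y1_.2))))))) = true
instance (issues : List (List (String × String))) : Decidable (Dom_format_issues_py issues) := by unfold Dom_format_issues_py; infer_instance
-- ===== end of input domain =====

-- B replaces A's two filter-then-slice-then-format passes by one capped single pass that
-- formats at most 3 lines per severity on the fly and breaks early (alternative decomposition).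


-- shared helper: d.get(k) on a dict given as an association list (first match)
def pvGet? (i : List (String × String)) (k : String) : Option String :=
  (PySem.Dict.mk i).get? k

-- ===== PORT A =====
def format_issues_py (issues : List (List (String × String))) : List String :=
  let result := ["### [IMPROVEMENTS NEEDED]"]
  let critical := issues.filter (fun i => pvGet? i "severity" == some "critical")
  let major := issues.filter (fun i => pvGet? i "severity" == some "major")
  let result :=
    if critical ≠ [] then
      (result ++ ["**Critical Issues:**"]) ++
        (PySem.List.slice critical none (some 3)).map
          (fun issue => "- " ++ (pvGet? issue "description").getD "")   -- issue['description']: KeyError (none) excluded by Pre_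
    else result
  let result :=
    if major ≠ [] then
      (result ++ ["**Major Issues:**"]) ++
        (PySem.List.slice major none (some 3)).map
          (fun issue => "- " ++ (pvGet? issue "description").getD "")   -- issue['description']: KeyError (none) excluded by Pre_
    else result
  result ++ [""]

-- ===== PORT B =====
-- "- {issue['description']}" (KeyError (none) excluded by Pre_)
def pvFmt (issue : List (String × String)) : String :=
  "- " ++ (pvGet? issue "description").getD ""

-- B's for-loop with the early break: one capped pass accumulating formatted lines
def pvLoop : List (List (String × String)) → List String → List String → List String × List String
  | [], crit, maj => (crit, maj)
  | issue :: rest, crit, maj =>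
    if crit.length == 3 && maj.length == 3 then (crit, maj)   -- break
    else
      let sev := pvGet? issue "severity"
      if sev == some "critical" then
        if crit.length < 3 then pvLoop rest (crit ++ [pvFmt issue]) maj
        else pvLoop rest crit maj
      else if sev == some "major" then
        if maj.length < 3 then pvLoop rest crit (maj ++ [pvFmt issue])
        else pvLoop rest crit maj
      else pvLoop rest crit maj

def format_issues_py_alt (issues : List (List (String × String))) : List String :=
  let cm := pvLoop issues [] []
  let out := ["### [IMPROVEMENTS NEEDED]"]
  let out := if cm.1 ≠ [] then out ++ ["**Critical Issues:**"] ++ cm.1 else out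
  let out := if cm.2 ≠ [] then out ++ ["**Major Issues:**"] ++ cm.2 else out
  out ++ [""]

-- ===== PRECONDITION & SPEC =====
-- Pre_ excludes exactly the inputs where Python A raises KeyError: an issue among the first three of
-- the critical bucket or of the major bucket that has no "description" key (B raises there too).
def Pre_format_issues_py (issues : List (List (String × String))) : Prop :=
  (((issues.filter (fun i => pvGet? i "severity" == some "critical")).take 3 ++
    (issues.filter (fun i => pvGet? i "severity" == some "major")).take 3).all
      (fun i => (pvGet? i "description").isSome)) = true
instance (issues : List (List (String × String))) : Decidable (Pre_format_issues_py issues) := by unfold Pre_format_issues_py; infer_instance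

def pvWitness_format_issues_py : (List (List (String × String))) :=
  [[("severity", "critical"), ("description", "x")], [("severity", "minor")]]

def Spec_format_issues_py (issues : List (List (String × String))) (out : List String) : Prop := out = format_issues_py_alt issues
instance (issues : List (List (String × String))) (out : List String) : Decidable (Spec_format_issues_py issues out) := by unfold Spec_format_issues_py; infer_instance

-- ===== CLAIM (what is proved, stated in full; the proofs are below) =====
def Claim_equal_format_issues_py : Prop := ∀ (issues : List (List (String × String))), Dom_format_issues_py issues → Pre_format_issues_py issues → Spec_format_issues_py issues (format_issues_py issues)

-- ===== LEMMAS AND PROOFS =====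

-- loop invariant: pvLoop extends each accumulator with the formatted take of the remaining filter
theorem pvLoop_eq (issues : List (List (String × String))) (crit maj : List String)
    (hc : crit.length ≤ 3) (hm : maj.length ≤ 3) :
    pvLoop issues crit maj =
      (crit ++ ((issues.filter (fun i => pvGet? i "severity" == some "critical")).take (3 - crit.length)).map pvFmt,
       maj ++ ((issues.filter (fun i => pvGet? i "severity" == some "major")).take (3 - maj.length)).map pvFmt) := by
  induction issues generalizing crit maj with
  | nil => simp [pvLoop]
  | cons issue rest ih =>
    rw [pvLoop]
    by_cases hb : crit.length = 3 ∧ maj.length = 3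
    · simp [hb.1, hb.2]
    · have hb' : (crit.length == 3 && maj.length == 3) = false := by
        simp only [Bool.and_eq_false_iff, beq_eq_false_iff_ne]; omega
      rw [hb']
      simp only [Bool.false_eq_true, if_false]
      by_cases hcr : pvGet? issue "severity" == some "critical"
      · have hmj : (pvGet? issue "severity" == some "major") = false := by
          simp only [beq_iff_eq] at hcr ⊢; simp [hcr]
        by_cases hlt : crit.length < 3
        · rw [if_pos hcr, if_pos hlt, ih _ _ (by simp; omega) hm]
          have h3 : 3 - crit.length = (3 - (crit ++ [pvFmt issue]).length) + 1 := by
            simp; omega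
          simp [hcr, hmj, h3, List.take_succ_cons]
        · rw [if_pos hcr, if_neg hlt, ih _ _ hc hm]
          have h0 : 3 - crit.length = 0 := by omega
          simp [hcr, hmj, h0]
      · rw [if_neg hcr]
        by_cases hmj : pvGet? issue "severity" == some "major"
        · by_cases hlt : maj.length < 3
          · rw [if_pos hmj, if_pos hlt, ih _ _ hc (by simp; omega)]
            have h3 : 3 - maj.length = (3 - (maj ++ [pvFmt issue]).length) + 1 := by
              simp; omega
            simp [hcr, hmj, h3, List.take_succ_cons]
          · rw [if_pos hmj, if_neg hlt, ih _ _ hc hm]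
            have h0 : 3 - maj.length = 0 := by omega
            simp [hcr, hmj, h0]
        · rw [if_neg hmj, ih _ _ hc hm]
          simp [hcr, hmj]

-- ===== VERDICT (by name: the statement is the Claim_ definition above) =====
theorem format_issues_py_spec : Claim_equal_format_issues_py := by
  intro issues _ _
  unfold Spec_format_issues_py format_issues_py format_issues_py_alt
  rw [pvLoop_eq issues [] [] (by simp) (by simp)]
  simp only [List.nil_append, List.length_nil, Nat.sub_zero]
  have hs : ∀ l : List (List (String × String)),
      PySem.List.slice l none (some 3) = l.take 3 := by
    intro l
    have := PySem.List.slice_to_natCast (xs := l) (b := 3)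
    simpa using this
  rw [hs, hs,
    show (fun issue : List (String × String) => "- " ++ (pvGet? issue "description").getD "") = pvFmt from rfl]
  simp only [ne_eq, List.map_eq_nil_iff, List.take_eq_nil_iff]
  by_cases h1 : issues.filter (fun i => pvGet? i "severity" == some "critical") = [] <;>
    by_cases h2 : issues.filter (fun i => pvGet? i "severity" == some "major") = [] <;>
      simp [h1, h2]
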